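-- pv_equiv track=rewrite | github.com/Jufa888/dualbot | logic.py | get_display_pokemon_name
-- ===== SOURCE A (Python) =====
-- LEVEL_EVOLUTIONS = {
--     "aron": ["aron", "lairon", "aggron", "aggron-mega"],
--     "squirtle": ["squirtle", "wartortle", "blastoise", "blastoise-mega"],
--     "weedle": ["weedle", "kakuna", "beedrill", "beedrill-mega"],
--     "dratini": ["dratini", "dragonair", "dragonite", "dragonite-mega"],
--     "mareep": ["mareep", "flaaffy", "ampharos", "ampharos-mega"],
--     "gastly": ["gastly", "haunter", "gengar", "gengar-mega"],
--     "charmander": ["charmander", "charmeleon", "charizard", "charizard-mega-x"],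
--     "cleffa": ["cleffa", "clefairy", "clefable", "clefable-mega"],
--     "frigibax": ["frigibax", "arctibax", "baxcalibur", "baxcalibur-mega"],
--     "torchic": ["torchic", "combusken", "blaziken", "blaziken-mega"],
--     "starly": ["starly", "staravia", "staraptor", "staraptor-mega"],
--     "bulbasaur": ["bulbasaur", "ivysaur", "venusaur", "venusaur-mega"],
--     "ralts": ["ralts", "kirlia", "gardevoir", "gardevoir-mega"],
--     "larvitar": ["larvitar", "pupitar", "tyranitar", "tyranitar-mega"],
--     "froakie": ["froakie", "frogadier", "greninja", "greninja-mega"],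
--     "gible": ["gible", "gabite", "garchomp", "garchomp-mega"],
--     "bellsprout": ["bellsprout", "weepinbell", "victreebel", "victreebel-mega"],
--     "pidgey": ["pidgey", "pidgeotto", "pidgeot", "pidgeot-mega"],
--     "phantump": ["phantump", "trevenant"],
-- }
--
-- def get_display_pokemon_name(pokemon_name: str, nivel: int) -> str:
--
--     shiny = False
--
--     if pokemon_name.endswith("_shiny"):
--         shiny = True
--         pokemon_name = pokemon_name.replace("_shiny", "")
--
--     # calcular stage como ya haces
--     stage = 0
--     if nivel >= 45:
--         stage = 3
--     elif nivel >= 30: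
--         stage = 2
--     elif nivel >= 15:
--         stage = 1
--
--     for base, chain in LEVEL_EVOLUTIONS.items():
--         if pokemon_name in chain:
--
--             if stage >= len(chain):
--                 final = chain[-1]
--             else:
--                 final = chain[stage]
--
--             if shiny:
--                 return f"{final}_shiny"
--             return final
--
--     # si no está en sistema cerrado
--     return f"{pokemon_name}_shiny" if shiny else pokemon_name
-- ===== SOURCE B (Python) =====
-- LEVEL_EVOLUTIONS = {
--     "aron": ["aron", "lairon", "aggron", "aggron-mega"],
--     "squirtle": ["squirtle", "wartortle", "blastoise", "blastoise-mega"],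
--     "weedle": ["weedle", "kakuna", "beedrill", "beedrill-mega"],
--     "dratini": ["dratini", "dragonair", "dragonite", "dragonite-mega"],
--     "mareep": ["mareep", "flaaffy", "ampharos", "ampharos-mega"],
--     "gastly": ["gastly", "haunter", "gengar", "gengar-mega"],
--     "charmander": ["charmander", "charmeleon", "charizard", "charizard-mega-x"],
--     "cleffa": ["cleffa", "clefairy", "clefable", "clefable-mega"],
--     "frigibax": ["frigibax", "arctibax", "baxcalibur", "baxcalibur-mega"],
--     "torchic": ["torchic", "combusken", "blaziken", "blaziken-mega"],
--     "starly": ["starly", "staravia", "staraptor", "staraptor-mega"],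
--     "bulbasaur": ["bulbasaur", "ivysaur", "venusaur", "venusaur-mega"],
--     "ralts": ["ralts", "kirlia", "gardevoir", "gardevoir-mega"],
--     "larvitar": ["larvitar", "pupitar", "tyranitar", "tyranitar-mega"],
--     "froakie": ["froakie", "frogadier", "greninja", "greninja-mega"],
--     "gible": ["gible", "gabite", "garchomp", "garchomp-mega"],
--     "bellsprout": ["bellsprout", "weepinbell", "victreebel", "victreebel-mega"],
--     "pidgey": ["pidgey", "pidgeotto", "pidgeot", "pidgeot-mega"],
--     "phantump": ["phantump", "trevenant"],
-- }
--
-- # Successor-pointer representation of the chains: every known name points to the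
-- # base of its family (BASE) and each family member to its successor (NEXT).
-- BASE = {}
-- NEXT = {}
-- for _chain in LEVEL_EVOLUTIONS.values():
--     for _i, _name in enumerate(_chain):
--         BASE[_name] = _chain[0]
--         if _i + 1 < len(_chain):
--             NEXT[_name] = _chain[_i + 1]
--
-- def get_display_pokemon_name(pokemon_name: str, nivel: int) -> str:
--     shiny = pokemon_name.endswith("_shiny")
--     if shiny:
--         pokemon_name = pokemon_name.replace("_shiny", "")
--     # stage = number of level thresholds passed
--     stage = (nivel >= 15) + (nivel >= 30) + (nivel >= 45)
--     cur = BASE.get(pokemon_name)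
--     if cur is None:
--         return pokemon_name + "_shiny" if shiny else pokemon_name
--     # walk `stage` evolution steps from the base, saturating at the end of the chain
--     for _ in range(stage):
--         cur = NEXT.get(cur, cur)
--     return cur + "_shiny" if shiny else cur
-- ===== Notes on version B (the rewrite author's own statement) =====
-- stated objective: alternative
-- what changed: Replaces the per-call scan over whole chains and direct chain[stage] indexing by a successor-pointer representation: module-level BASE (name -> chain base) and NEXT (name -> next evolution) maps, and the function walks `stage` evolution steps from the base, saturating at the chain end, instead of indexing into a chain list.
import Mathlib
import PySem

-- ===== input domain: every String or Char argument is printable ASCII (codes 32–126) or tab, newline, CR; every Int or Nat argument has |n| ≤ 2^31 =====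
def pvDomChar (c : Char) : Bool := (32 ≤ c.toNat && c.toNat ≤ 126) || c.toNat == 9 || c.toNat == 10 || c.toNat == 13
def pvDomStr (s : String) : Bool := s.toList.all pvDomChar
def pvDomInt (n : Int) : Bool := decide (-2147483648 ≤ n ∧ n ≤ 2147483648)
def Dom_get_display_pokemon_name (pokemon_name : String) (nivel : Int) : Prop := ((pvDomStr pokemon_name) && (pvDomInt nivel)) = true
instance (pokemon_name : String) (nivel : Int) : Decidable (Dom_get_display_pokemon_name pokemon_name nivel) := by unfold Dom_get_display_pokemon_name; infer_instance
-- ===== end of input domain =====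

-- B replaces A's scan over whole evolution chains (and chain[stage] indexing) by a
-- successor-pointer representation: BASE/NEXT maps built once, and a walk of `stage`
-- evolution steps from the chain base, saturating at the end (alternative; same value).

-- ===== PORT A =====
-- LEVEL_EVOLUTIONS, in insertion order (dict -> association list).
def pvLevelEvolutions : List (String × List String) := [
  ("aron", ["aron", "lairon", "aggron", "aggron-mega"]),
  ("squirtle", ["squirtle", "wartortle", "blastoise", "blastoise-mega"]),
  ("weedle", ["weedle", "kakuna", "beedrill", "beedrill-mega"]),
  ("dratini", ["dratini", "dragonair", "dragonite", "dragonite-mega"]),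
  ("mareep", ["mareep", "flaaffy", "ampharos", "ampharos-mega"]),
  ("gastly", ["gastly", "haunter", "gengar", "gengar-mega"]),
  ("charmander", ["charmander", "charmeleon", "charizard", "charizard-mega-x"]),
  ("cleffa", ["cleffa", "clefairy", "clefable", "clefable-mega"]),
  ("frigibax", ["frigibax", "arctibax", "baxcalibur", "baxcalibur-mega"]),
  ("torchic", ["torchic", "combusken", "blaziken", "blaziken-mega"]),
  ("starly", ["starly", "staravia", "staraptor", "staraptor-mega"]),
  ("bulbasaur", ["bulbasaur", "ivysaur", "venusaur", "venusaur-mega"]),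
  ("ralts", ["ralts", "kirlia", "gardevoir", "gardevoir-mega"]),
  ("larvitar", ["larvitar", "pupitar", "tyranitar", "tyranitar-mega"]),
  ("froakie", ["froakie", "frogadier", "greninja", "greninja-mega"]),
  ("gible", ["gible", "gabite", "garchomp", "garchomp-mega"]),
  ("bellsprout", ["bellsprout", "weepinbell", "victreebel", "victreebel-mega"]),
  ("pidgey", ["pidgey", "pidgeotto", "pidgeot", "pidgeot-mega"]),
  ("phantump", ["phantump", "trevenant"])
]

-- the 'for base, chain in LEVEL_EVOLUTIONS.items(): if pokemon_name in chain: … return …' loop;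
-- some r = an early return of r, none = the loop fell through.
def pvLoopA (pokemon_name : String) (shiny : Bool) (stage : Int) : List (String × List String) → Option String
  | [] => none
  | (_, chain) :: rest =>
      if chain.contains pokemon_name then
        let final := if stage ≥ (chain.length : Int)
          then (PySem.List.pyGet? chain (-1)).getD ""   -- chain[-1]; chains are nonempty, the default is unreachable
          else (PySem.List.pyGet? chain stage).getD ""  -- chain[stage]; stage ∈ {0,1,2,3} < length here, default unreachable
        some (if shiny then final ++ "_shiny" else final)
      else pvLoopA pokemon_name shiny stage rest

def get_display_pokemon_name (pokemon_name : String) (nivel : Int) : String :=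
  let shiny := PySem.Str.endswith pokemon_name "_shiny"
  let pname := if shiny then PySem.Str.replace pokemon_name "_shiny" "" else pokemon_name
  let stage : Int := if nivel ≥ 45 then 3 else if nivel ≥ 30 then 2 else if nivel ≥ 15 then 1 else 0
  match pvLoopA pname shiny stage pvLevelEvolutions with
  | some r => r
  | none => if shiny then pname ++ "_shiny" else pname

-- ===== PORT B =====
-- the module-level build loop: BASE[name] = chain[0]; NEXT[name] = chain[i+1] when it exists
def pvMaps : PySem.Dict String String × PySem.Dict String String :=
  (pvLevelEvolutions.map Prod.snd).foldl
    (fun st chain =>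
      (PySem.List.enumerate chain).foldl
        (fun st p =>
          let base := st.1.insert p.2 ((PySem.List.pyGet? chain 0).getD "")
          let next := if p.1 + 1 < (chain.length : Int)
            then st.2.insert p.2 ((PySem.List.pyGet? chain (p.1 + 1)).getD "")
            else st.2
          (base, next)) st)
    (PySem.Dict.empty, PySem.Dict.empty)

def pvBASE : PySem.Dict String String := pvMaps.1
def pvNEXT : PySem.Dict String String := pvMaps.2

def get_display_pokemon_name_alt (pokemon_name : String) (nivel : Int) : String :=
  let shiny := PySem.Str.endswith pokemon_name "_shiny"
  let pname := if shiny then PySem.Str.replace pokemon_name "_shiny" "" else pokemon_name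
  let stage : Int := (if nivel ≥ 15 then (1:Int) else 0) + (if nivel ≥ 30 then 1 else 0) + (if nivel ≥ 45 then 1 else 0)
  match pvBASE.get? pname with
  | none => if shiny then pname ++ "_shiny" else pname
  | some cur0 =>
      -- for _ in range(stage): cur = NEXT.get(cur, cur)
      let final := (PySem.List.pyRange 0 stage 1).foldl (fun cur _ => (pvNEXT.get? cur).getD cur) cur0
      if shiny then final ++ "_shiny" else final

-- ===== PRECONDITION & SPEC =====
def Spec_get_display_pokemon_name (pokemon_name : String) (nivel : Int) (out : String) : Prop := out = get_display_pokemon_name_alt pokemon_name nivel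
instance (pokemon_name : String) (nivel : Int) (out : String) : Decidable (Spec_get_display_pokemon_name pokemon_name nivel out) := by unfold Spec_get_display_pokemon_name; infer_instance

-- ===== CLAIM (what is proved, stated in full; the proofs are below) =====
def Claim_equal_get_display_pokemon_name : Prop := ∀ (pokemon_name : String) (nivel : Int), Dom_get_display_pokemon_name pokemon_name nivel → Spec_get_display_pokemon_name pokemon_name nivel (get_display_pokemon_name pokemon_name nivel)

-- ===== LEMMAS AND PROOFS =====
-- all names occurring in any chain (74 of them, pairwise distinct)
def pvAllNames : List String := ["aron", "lairon", "aggron", "aggron-mega", "squirtle", "wartortle", "blastoise", "blastoise-mega", "weedle", "kakuna", "beedrill", "beedrill-mega", "dratini", "dragonair", "dragonite", "dragonite-mega", "mareep", "flaaffy", "ampharos", "ampharos-mega", "gastly", "haunter", "gengar", "gengar-mega", "charmander", "charmeleon", "charizard", "charizard-mega-x", "cleffa", "clefairy", "clefable", "clefable-mega", "frigibax", "arctibax", "baxcalibur", "baxcalibur-mega", "torchic", "combusken", "blaziken", "blaziken-mega", "starly", "staravia", "staraptor", "staraptor-mega", "bulbasaur", "ivysaur", "venusaur", "venusaur-mega",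 "ralts", "kirlia", "gardevoir", "gardevoir-mega", "larvitar", "pupitar", "tyranitar", "tyranitar-mega", "froakie", "frogadier", "greninja", "greninja-mega", "gible", "gabite", "garchomp", "garchomp-mega", "bellsprout", "weepinbell", "victreebel", "victreebel-mega", "pidgey", "pidgeotto", "pidgeot", "pidgeot-mega", "phantump", "trevenant"]


-- pvMaps as literal association lists (names unique, so the inserts append in order)
def pvBasePairs : List (String × String) := [
  ("aron", "aron"),
  ("lairon", "aron"),
  ("aggron", "aron"),
  ("aggron-mega", "aron"),
  ("squirtle", "squirtle"),
  ("wartortle", "squirtle"),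
  ("blastoise", "squirtle"),
  ("blastoise-mega", "squirtle"),
  ("weedle", "weedle"),
  ("kakuna", "weedle"),
  ("beedrill", "weedle"),
  ("beedrill-mega", "weedle"),
  ("dratini", "dratini"),
  ("dragonair", "dratini"),
  ("dragonite", "dratini"),
  ("dragonite-mega", "dratini"),
  ("mareep", "mareep"),
  ("flaaffy", "mareep"),
  ("ampharos", "mareep"),
  ("ampharos-mega", "mareep"),
  ("gastly", "gastly"),
  ("haunter", "gastly"),
  ("gengar", "gastly"),
  ("gengar-mega", "gastly"),
  ("charmander", "charmander"),
  ("charmeleon", "charmander"),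
  ("charizard", "charmander"),
  ("charizard-mega-x", "charmander"),
  ("cleffa", "cleffa"),
  ("clefairy", "cleffa"),
  ("clefable", "cleffa"),
  ("clefable-mega", "cleffa"),
  ("frigibax", "frigibax"),
  ("arctibax", "frigibax"),
  ("baxcalibur", "frigibax"),
  ("baxcalibur-mega", "frigibax"),
  ("torchic", "torchic"),
  ("combusken", "torchic"),
  ("blaziken", "torchic"),
  ("blaziken-mega", "torchic"),
  ("starly", "starly"),
  ("staravia", "starly"),
  ("staraptor", "starly"),
  ("staraptor-mega", "starly"),
  ("bulbasaur", "bulbasaur"),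
  ("ivysaur", "bulbasaur"),
  ("venusaur", "bulbasaur"),
  ("venusaur-mega", "bulbasaur"),
  ("ralts", "ralts"),
  ("kirlia", "ralts"),
  ("gardevoir", "ralts"),
  ("gardevoir-mega", "ralts"),
  ("larvitar", "larvitar"),
  ("pupitar", "larvitar"),
  ("tyranitar", "larvitar"),
  ("tyranitar-mega", "larvitar"),
  ("froakie", "froakie"),
  ("frogadier", "froakie"),
  ("greninja", "froakie"),
  ("greninja-mega", "froakie"),
  ("gible", "gible"),
  ("gabite", "gible"),
  ("garchomp", "gible"),
  ("garchomp-mega", "gible"),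
  ("bellsprout", "bellsprout"),
  ("weepinbell", "bellsprout"),
  ("victreebel", "bellsprout"),
  ("victreebel-mega", "bellsprout"),
  ("pidgey", "pidgey"),
  ("pidgeotto", "pidgey"),
  ("pidgeot", "pidgey"),
  ("pidgeot-mega", "pidgey"),
  ("phantump", "phantump"),
  ("trevenant", "phantump")
]

def pvNextPairs : List (String × String) := [
  ("aron", "lairon"),
  ("lairon", "aggron"),
  ("aggron", "aggron-mega"),
  ("squirtle", "wartortle"),
  ("wartortle", "blastoise"),
  ("blastoise", "blastoise-mega"),
  ("weedle", "kakuna"),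
  ("kakuna", "beedrill"),
  ("beedrill", "beedrill-mega"),
  ("dratini", "dragonair"),
  ("dragonair", "dragonite"),
  ("dragonite", "dragonite-mega"),
  ("mareep", "flaaffy"),
  ("flaaffy", "ampharos"),
  ("ampharos", "ampharos-mega"),
  ("gastly", "haunter"),
  ("haunter", "gengar"),
  ("gengar", "gengar-mega"),
  ("charmander", "charmeleon"),
  ("charmeleon", "charizard"),
  ("charizard", "charizard-mega-x"),
  ("cleffa", "clefairy"),
  ("clefairy", "clefable"),
  ("clefable", "clefable-mega"),
  ("frigibax", "arctibax"),
  ("arctibax", "baxcalibur"),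
  ("baxcalibur", "baxcalibur-mega"),
  ("torchic", "combusken"),
  ("combusken", "blaziken"),
  ("blaziken", "blaziken-mega"),
  ("starly", "staravia"),
  ("staravia", "staraptor"),
  ("staraptor", "staraptor-mega"),
  ("bulbasaur", "ivysaur"),
  ("ivysaur", "venusaur"),
  ("venusaur", "venusaur-mega"),
  ("ralts", "kirlia"),
  ("kirlia", "gardevoir"),
  ("gardevoir", "gardevoir-mega"),
  ("larvitar", "pupitar"),
  ("pupitar", "tyranitar"),
  ("tyranitar", "tyranitar-mega"),
  ("froakie", "frogadier"),
  ("frogadier", "greninja"),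
  ("greninja", "greninja-mega"),
  ("gible", "gabite"),
  ("gabite", "garchomp"),
  ("garchomp", "garchomp-mega"),
  ("bellsprout", "weepinbell"),
  ("weepinbell", "victreebel"),
  ("victreebel", "victreebel-mega"),
  ("pidgey", "pidgeotto"),
  ("pidgeotto", "pidgeot"),
  ("pidgeot", "pidgeot-mega"),
  ("phantump", "trevenant")
]

set_option maxRecDepth 100000 in
lemma pvMaps_eq : pvMaps = (PySem.Dict.mk pvBasePairs, PySem.Dict.mk pvNextPairs) := by decide

lemma pvKeysBase : pvBASE.keys = pvAllNames := by
  rw [pvBASE, pvMaps_eq]; decide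

lemma pvChains_sub : ∀ p ∈ pvLevelEvolutions, ∀ n ∈ p.2, n ∈ pvAllNames := by decide

lemma pvLoopA_none (s : String) (shiny : Bool) (stage : Int) (l : List (String × List String))
    (hl : ∀ p ∈ l, ∀ n ∈ p.2, n ∈ pvAllNames) (h : s ∉ pvAllNames) :
    pvLoopA s shiny stage l = none := by
  induction l with
  | nil => rfl
  | cons p rest ih =>
    obtain ⟨b, chain⟩ := p
    have hc : chain.contains s = false := by
      by_contra hcc
      simp only [Bool.not_eq_false] at hcc
      exact h (hl (b, chain) (by simp) s (by simpa using hcc))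
    simp only [pvLoopA, hc, Bool.false_eq_true, if_false]
    exact ih (fun q hq => hl q (List.mem_cons_of_mem _ hq))

-- the two bodies agree for every name and every stage in {0,1,2,3}
set_option maxRecDepth 100000 in
set_option maxHeartbeats 2000000 in
lemma pvAgree (s : String) (shiny : Bool) (k : Int)
    (hk : k = 0 ∨ k = 1 ∨ k = 2 ∨ k = 3) :
    (match pvLoopA s shiny k pvLevelEvolutions with
     | some r => r
     | none => if shiny then s ++ "_shiny" else s)
    = (match pvBASE.get? s with
       | none => if shiny then s ++ "_shiny" else s
       | some cur0 =>
          let final := (PySem.List.pyRange 0 k 1).foldl (fun cur _ => (pvNEXT.get? cur).getD cur) cur0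
          if shiny then final ++ "_shiny" else final) := by
  have hB : pvBASE = PySem.Dict.mk pvBasePairs := by rw [pvBASE, pvMaps_eq]
  have hN : pvNEXT = PySem.Dict.mk pvNextPairs := by rw [pvNEXT, pvMaps_eq]
  rw [hB, hN]
  by_cases h : s ∈ pvAllNames
  · rcases hk with rfl | rfl | rfl | rfl <;> fin_cases h <;> rfl
  · have h1 : pvLoopA s shiny k pvLevelEvolutions = none :=
      pvLoopA_none s shiny k pvLevelEvolutions pvChains_sub h
    have h2 : (PySem.Dict.mk pvBasePairs).get? s = none := by
      rw [← hB, PySem.Dict.get?_eq_none_iff_not_mem_keys, pvKeysBase]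
      exact h
    rw [h1, h2]

-- ===== VERDICT (by name: the statement is the Claim_ definition above) =====
set_option maxRecDepth 100000 in
theorem get_display_pokemon_name_spec : Claim_equal_get_display_pokemon_name := by
  intro pokemon_name nivel _
  unfold Spec_get_display_pokemon_name
  unfold get_display_pokemon_name get_display_pokemon_name_alt
  have hst : ((if nivel ≥ 15 then (1:Int) else 0) + (if nivel ≥ 30 then 1 else 0) + (if nivel ≥ 45 then 1 else 0))
      = (if nivel ≥ 45 then (3:Int) else if nivel ≥ 30 then 2 else if nivel ≥ 15 then 1 else 0) := by
    split_ifs <;> omega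
  simp only [hst]
  exact pvAgree _ _ _ (by split_ifs <;> simp)
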